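-- pv_equiv track=rewrite | github.com/EndikaEiros/dumb_maze_runner | src/nodo_rl/src/nodoRL.py | optimizar_ruta
-- ===== SOURCE A (Python) =====
-- def optimizar_ruta(lista):
--
--     """
--         Dada una lista de estados elimina los estados intermedios innecesarios
--         Ejemplo: [(0, 7), (1, 7), (2, 7), (1, 7), (1, 6)] --> [(0, 7), (1, 7), (1, 6)]
--     """
--     lista_simplificada = lista
--
--     for idx, element in enumerate(lista):
--
--         if lista.count(element) > 1:
--             pos = lista[idx + 1:].index(element) + len(lista[:idx + 1])
--             lista_simplificada = lista[:idx] + lista[pos:]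
--             break
--
--     return lista_simplificada
-- ===== SOURCE B (Python) =====
-- def optimizar_ruta(lista):
--     # Stage 1: one pass recording, per state, its first index and (if any) the
--     # index of its second occurrence.  States are keyed by repr: an injective,
--     # always-hashable key for these int-pair states (which may arrive as lists).
--     occ = {}
--     for j, e in enumerate(lista):
--         k = repr(e)
--         if k in occ:
--             if occ[k][1] is None:
--                 occ[k] = (occ[k][0], j)
--         else:
--             occ[k] = (j, None)
--     # Stage 2: among the states that repeat, pick the one whose first occurrence
--     # is earliest and splice out the segment between its two occurrences.
--     pairs = [(i, j) for (i, j) in occ.values() if j is not None]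
--     if not pairs:
--         return lista
--     i, j = min(pairs)
--     return lista[:i] + lista[j:]
-- ===== Notes on version B (the rewrite author's own statement) =====
-- stated objective: faster
-- what changed: Instead of A's scan with a full .count pass per element and slice-based next-occurrence search, B makes one pass building a first/second-occurrence index per state, then takes the min over the repeating states' occurrence pairs and splices once: O(n) expected vs A's O(n^2).
import Mathlib
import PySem

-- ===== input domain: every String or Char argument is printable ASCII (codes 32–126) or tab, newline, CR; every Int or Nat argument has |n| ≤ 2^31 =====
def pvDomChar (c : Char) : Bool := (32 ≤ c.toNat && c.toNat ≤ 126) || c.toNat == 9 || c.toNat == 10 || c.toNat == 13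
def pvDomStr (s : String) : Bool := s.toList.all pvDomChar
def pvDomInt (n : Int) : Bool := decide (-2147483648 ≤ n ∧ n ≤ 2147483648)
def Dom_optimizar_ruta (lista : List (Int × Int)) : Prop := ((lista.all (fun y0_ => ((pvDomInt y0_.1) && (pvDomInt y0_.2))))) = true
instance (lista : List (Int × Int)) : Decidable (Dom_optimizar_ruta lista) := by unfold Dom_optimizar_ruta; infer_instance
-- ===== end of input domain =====

-- B replaces A's per-element .count full scan by one occurrence-indexing pass plus a min
-- over the repeating states' (first, second) index pairs; return values proved equal.


-- ===== PORT A =====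
-- 'for idx, element in enumerate(lista): if lista.count(element) > 1: … break'
-- (the index counter of enumerate is carried explicitly; the 'none' branch of index?
--  is unreachable: at the first idx with count > 1 the element reoccurs after idx)
def optARun (lista : List (Int × Int)) : Nat → List (Int × Int) → List (Int × Int)
  | _, [] => lista
  | idx, element :: rest =>
    if PySem.List.count lista element > 1 then
      match PySem.List.index? (lista.drop (idx + 1)) element with
      | some k => lista.take idx ++ lista.drop (k + (lista.take (idx + 1)).length)
      | none => lista
    else optARun lista (idx + 1) rest

def optimizar_ruta (lista : List (Int × Int)) : List (Int × Int) :=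
  optARun lista 0 lista

-- ===== PORT B =====
-- first loop of Source B: 'if k in occ: if occ[k][1] is None: occ[k] = (occ[k][0], j) else pass
-- else: occ[k] = (j, None)'  (Source B keys the dict by repr(e), an injective encoding of these
-- int-pair states, so keying by the pair itself is exact; 'occ[k]' under 'k in occ' is
-- get?'s some branch; the none branch of the match, unreachable there, leaves occ
-- unchanged like the 'else pass')
def occStep (d : PySem.Dict (Int × Int) (Int × Option Int)) (p : Int × (Int × Int)) :
    PySem.Dict (Int × Int) (Int × Option Int) :=
  if d.contains p.2 then
    match d.get? p.2 with
    | some (f, none) => d.insert p.2 (f, some p.1)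
    | _ => d
  else d.insert p.2 (p.1, none)

-- '[(i, j) for (i, j) in occ.values() if j is not None]' is the filterMap below;
-- 'min(pairs)' on int pairs is Python's lexicographic first-minimum = PySem.List.min2?,
-- whose none case is exactly Source B's 'if not pairs: return lista'
def optimizar_ruta_alt (lista : List (Int × Int)) : List (Int × Int) :=
  let occ := (PySem.List.enumerate lista 0).foldl occStep PySem.Dict.empty
  let pairs := occ.values.filterMap (fun p => p.2.map (fun j => (p.1, j)))
  match PySem.List.min2? pairs Prod.fst Prod.snd with
  | none => lista
  | some (i, j) =>
      PySem.List.slice lista none (some i) ++ PySem.List.slice lista (some j) none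

-- ===== PRECONDITION & SPEC =====
def Spec_optimizar_ruta (lista : List (Int × Int)) (out : List (Int × Int)) : Prop := out = optimizar_ruta_alt lista
instance (lista : List (Int × Int)) (out : List (Int × Int)) : Decidable (Spec_optimizar_ruta lista out) := by unfold Spec_optimizar_ruta; infer_instance

-- ===== CLAIM (what is proved, stated in full; the proofs are below) =====
def Claim_equal_optimizar_ruta : Prop := ∀ (lista : List (Int × Int)), Dom_optimizar_ruta lista → Spec_optimizar_ruta lista (optimizar_ruta lista)

-- ===== LEMMAS AND PROOFS =====

-- Common reference point of the two proofs: the first position i whose element reoccurs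
-- later (at absolute position i + 1 + k), found by a plain left-to-right scan.
def findDup : List (Int × Int) → Nat → Option (Nat × Nat)
  | [], _ => none
  | e :: rest, i =>
    match PySem.List.index? rest e with
    | some k => some (i, i + 1 + k)
    | none => findDup rest (i + 1)

def splice (lista : List (Int × Int)) : Option (Nat × Nat) → List (Int × Int)
  | none => lista
  | some (i, j) => lista.take i ++ lista.drop j

-- first-occurrence index of e in l (callers establish e ∈ l)
def fstIdx (l : List (Int × Int)) (e : Int × Int) : Nat :=
  (PySem.List.index? l e).getD 0

-- second-occurrence index of e in l, as the Int the B-side dict stores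
def sndIdx? (l : List (Int × Int)) (e : Int × Int) : Option Int :=
  (PySem.List.index? (l.drop (fstIdx l e + 1)) e).map (fun k => (fstIdx l e : Int) + 1 + k)

-- what B's first loop builds: per distinct state, its first index and optional second index
def occSpec (l : List (Int × Int)) : List ((Int × Int) × (Int × Option Int)) :=
  (PySem.List.dedup l).map (fun e => (e, ((fstIdx l e : Int), sndIdx? l e)))

-- ---- A-side ----
lemma optARun_eq_findDup (lista : List (Int × Int)) :
    ∀ (s : List (Int × Int)) (i : Nat),
      lista.drop i = s →
      (∀ e ∈ lista.take i, PySem.List.count lista e ≤ 1) →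
      optARun lista i s = splice lista (findDup s i) := by
  intro s
  induction s with
  | nil => intro i _ _; simp [optARun, findDup, splice]
  | cons e rest ih =>
    intro i hdrop hpre
    have hi : i < lista.length := by
      by_contra h
      rw [List.drop_eq_nil_of_le (by omega)] at hdrop
      exact List.cons_ne_nil e rest hdrop.symm
    have hsplit : lista = lista.take i ++ e :: rest := by
      rw [← hdrop, List.take_append_drop]
    have hdrop1 : lista.drop (i + 1) = rest := by
      have := congrArg (List.drop 1) hdrop
      simpa [List.drop_drop, Nat.add_comm] using this
    have hcount : PySem.List.count lista e
        = (lista.take i).count e + 1 + rest.count e := by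
      conv_lhs => rw [PySem.List.count_eq, hsplit]
      simp [List.count_append]
      omega
    by_cases hpos : 0 < rest.count e
    · have hA : PySem.List.count lista e > 1 := by rw [hcount]; omega
      have hmem : e ∈ rest := List.count_pos_iff.mp hpos
      obtain ⟨k, hk⟩ : ∃ k, PySem.List.index? rest e = some k :=
        Option.isSome_iff_exists.mp ((PySem.List.index?_isSome_iff rest e).mpr hmem)
      have hlen : (lista.take (i + 1)).length = i + 1 := by
        simp [List.length_take]; omega
      simp only [optARun, if_pos hA, hdrop1, hk, findDup, splice, hlen]
      rw [Nat.add_comm]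
    · have hnotmem : e ∉ lista.take i := by
        intro hmem
        have h1 := hpre e hmem
        have h2 : 0 < (lista.take i).count e := List.count_pos_iff.mpr hmem
        omega
      have hA : ¬ PySem.List.count lista e > 1 := by
        rw [hcount]
        have : (lista.take i).count e = 0 := List.count_eq_zero.mpr hnotmem
        omega
      have hne : PySem.List.index? rest e = none := by
        rw [PySem.List.index?_eq_none_iff]
        intro hmem
        exact hpos (List.count_pos_iff.mpr hmem)
      simp only [optARun, if_neg hA, findDup, hne]
      apply ih
      · exact hdrop1
      · intro e' hmem
        have htake : lista.take (i + 1) = lista.take i ++ [e] := by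
          conv_lhs => rw [hsplit]
          have hl : (lista.take i).length = i := by simp [List.length_take]; omega
          rw [← hl, List.take_append]
          simp
        rw [htake] at hmem
        rcases List.mem_append.mp hmem with h | h
        · exact hpre e' h
        · have : e' = e := List.mem_singleton.mp h
          subst this
          rw [hcount]
          have : (lista.take i).count e' = 0 := List.count_eq_zero.mpr hnotmem
          have : rest.count e' = 0 := by omega
          omega

-- ---- first/second occurrence bookkeeping ----
lemma mem_of_index?_some {l : List (Int × Int)} {e : Int × Int} {k : Nat}
    (h : PySem.List.index? l e = some k) : e ∈ l := by
  have hiff := PySem.List.index?_isSome_iff l e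
  rw [h] at hiff
  exact hiff.mp rfl

lemma fstIdx_some {l : List (Int × Int)} {e : Int × Int} (h : e ∈ l) :
    PySem.List.index? l e = some (fstIdx l e) := by
  obtain ⟨k, hk⟩ := Option.isSome_iff_exists.mp ((PySem.List.index?_isSome_iff l e).mpr h)
  unfold fstIdx
  rw [hk]
  rfl

lemma not_mem_of_index?_none {l : List (Int × Int)} {e : Int × Int}
    (h : PySem.List.index? l e = none) : e ∉ l := by
  intro hm
  rw [fstIdx_some hm] at h
  simp at h

lemma fstIdx_lt {l : List (Int × Int)} {e : Int × Int} (h : e ∈ l) :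
    fstIdx l e < l.length := by
  obtain ⟨hk, _, _⟩ := PySem.List.getElem_of_index?_eq_some (fstIdx_some h)
  exact hk

lemma fstIdx_append {l : List (Int × Int)} (t : List (Int × Int)) {e : Int × Int}
    (h : e ∈ l) : fstIdx (l ++ t) e = fstIdx l e := by
  unfold fstIdx
  rw [PySem.List.index?_append_of_mem t h]

lemma fstIdx_append_self {l : List (Int × Int)} {x : Int × Int} (h : x ∉ l) :
    fstIdx (l ++ [x]) x = l.length := by
  unfold fstIdx
  rw [PySem.List.index?_append_singleton_self l x h]
  rfl

lemma drop_fstIdx_append {l : List (Int × Int)} (x : Int × Int) {e : Int × Int}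
    (h : e ∈ l) :
    (l ++ [x]).drop (fstIdx l e + 1) = l.drop (fstIdx l e + 1) ++ [x] :=
  List.drop_append_of_le_length (by have := fstIdx_lt h; omega)

lemma sndIdx?_append_of_ne {l : List (Int × Int)} {x e : Int × Int}
    (h : e ∈ l) (hne : e ≠ x) : sndIdx? (l ++ [x]) e = sndIdx? l e := by
  unfold sndIdx?
  rw [fstIdx_append [x] h, drop_fstIdx_append x h]
  cases hk : PySem.List.index? (l.drop (fstIdx l e + 1)) e with
  | some k =>
    rw [PySem.List.index?_append_of_mem [x] (mem_of_index?_some hk), hk]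
  | none =>
    have hm : e ∉ l.drop (fstIdx l e + 1) := not_mem_of_index?_none hk
    have hnone : PySem.List.index? (l.drop (fstIdx l e + 1) ++ [x]) e = none := by
      rw [PySem.List.index?_eq_none_iff]
      simp [hm, hne]
    rw [hnone]

lemma sndIdx?_append_of_some {l : List (Int × Int)} {x e : Int × Int} {j : Int}
    (h : e ∈ l) (hs : sndIdx? l e = some j) : sndIdx? (l ++ [x]) e = some j := by
  unfold sndIdx? at hs ⊢
  rw [fstIdx_append [x] h, drop_fstIdx_append x h]
  cases hk : PySem.List.index? (l.drop (fstIdx l e + 1)) e with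
  | some k =>
    rw [PySem.List.index?_append_of_mem [x] (mem_of_index?_some hk), hk]
    rw [hk] at hs
    exact hs
  | none => rw [hk] at hs; simp at hs

lemma sndIdx?_append_self {l : List (Int × Int)} {e : Int × Int}
    (h : e ∈ l) (hs : sndIdx? l e = none) :
    sndIdx? (l ++ [e]) e = some (l.length : Int) := by
  unfold sndIdx? at hs ⊢
  rw [fstIdx_append [e] h, drop_fstIdx_append e h]
  have hk : PySem.List.index? (l.drop (fstIdx l e + 1)) e = none := by
    cases hk : PySem.List.index? (l.drop (fstIdx l e + 1)) e with
    | some k => rw [hk] at hs; simp at hs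
    | none => rfl
  have hm : e ∉ l.drop (fstIdx l e + 1) := not_mem_of_index?_none hk
  rw [PySem.List.index?_append_singleton_self _ _ hm]
  have hlt := fstIdx_lt h
  simp [List.length_drop]
  omega

lemma sndIdx?_append_fresh {l : List (Int × Int)} {x : Int × Int} (h : x ∉ l) :
    sndIdx? (l ++ [x]) x = none := by
  unfold sndIdx?
  rw [fstIdx_append_self h]
  have hd : (l ++ [x]).drop (l.length + 1) = [] := by
    apply List.drop_eq_nil_of_le
    simp
  rw [hd]
  simp [PySem.List.index?_eq_idxOf?]

lemma dedup_append_singleton (l : List (Int × Int)) (x : Int × Int) :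
    PySem.List.dedup (l ++ [x])
      = if x ∈ l then PySem.List.dedup l else PySem.List.dedup l ++ [x] := by
  have h1 : PySem.List.dedup (l ++ [x]) = PySem.Set.add (PySem.List.dedup l) x := by
    simp [PySem.List.dedup, PySem.Set.ofList]
  have hc : PySem.Set.contains (PySem.List.dedup l) x = decide (x ∈ l) := by
    simp [PySem.Set.contains]
  rw [h1, PySem.Set.add, hc]
  split_ifs with h <;> simp_all

-- ---- B-side: the occurrence dict ----
lemma occ_items (l : List (Int × Int)) :
    ((PySem.List.enumerate l 0).foldl occStep PySem.Dict.empty).items = occSpec l := by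
  induction l using List.reverseRecOn with
  | nil =>
    simp [occSpec, PySem.List.enumerate, PySem.Dict.empty, PySem.List.dedup,
      PySem.Set.ofList, PySem.Set.empty]
  | append_singleton l x ih =>
    have henum : PySem.List.enumerate (l ++ [x]) 0
        = PySem.List.enumerate l 0 ++ [((l.length : Int), x)] := by
      rw [PySem.List.enumerate_append]
      simp [PySem.List.enumerate_cons, PySem.List.enumerate_nil]
    rw [henum, List.foldl_append, List.foldl_cons, List.foldl_nil]
    set occ := (PySem.List.enumerate l 0).foldl occStep PySem.Dict.empty with hocc
    have hkeys : occ.keys = PySem.List.dedup l := by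
      simp only [PySem.Dict.keys, ih, occSpec, List.map_map]
      simp [Function.comp_def]
    have hnd : occ.keys.Nodup := by
      rw [hkeys]; exact PySem.List.nodup_dedup l
    have hcont : occ.contains x = decide (x ∈ l) := by
      have h1 : occ.contains x = decide (x ∈ occ.keys) :=
        PySem.Dict.contains_eq_decide_mem_keys occ x
      rw [h1, hkeys]
      simp
    by_cases hx : x ∈ l
    · -- x already recorded
      have hmemit : (x, ((fstIdx l x : Int), sndIdx? l x)) ∈ occ.items := by
        rw [ih]
        exact List.mem_map_of_mem ((PySem.List.mem_dedup l x).mpr hx)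
      have hget : occ.get? x = some ((fstIdx l x : Int), sndIdx? l x) :=
        PySem.Dict.get?_of_mem_items occ hmemit hnd
      have hcont' : occ.contains x = true := by rw [hcont]; simpa
      have hded : PySem.List.dedup (l ++ [x]) = PySem.List.dedup l := by
        rw [dedup_append_singleton]; simp [hx]
      cases hs : sndIdx? l x with
      | none =>
        -- second occurrence gets recorded now
        have : occStep occ ((l.length : Int), x)
            = occ.insert x ((fstIdx l x : Int), some (l.length : Int)) := by
          rw [hs] at hget
          simp [occStep, hcont', hget]
        rw [this, PySem.Dict.items_insert_of_contains occ _ hcont', ih]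
        unfold occSpec
        rw [hded, List.map_map]
        apply List.map_congr_left
        intro e he
        have he' : e ∈ l := (PySem.List.mem_dedup l e).mp he
        by_cases hex : e = x
        · subst hex
          simp only [Function.comp_apply, beq_self_eq_true, if_pos]
          rw [fstIdx_append [e] he', sndIdx?_append_self he' hs]
        · have : (e == x) = false := by simpa using hex
          simp only [Function.comp_apply, this, Bool.false_eq_true, if_false]
          rw [fstIdx_append [x] he', sndIdx?_append_of_ne he' hex]
      | some j0 =>
        -- both occurrences already recorded: the dict is unchanged
        have : occStep occ ((l.length : Int), x) = occ := by
          rw [hs] at hget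
          simp [occStep, hcont', hget]
        rw [this, ih]
        unfold occSpec
        rw [hded]
        apply List.map_congr_left
        intro e he
        have he' : e ∈ l := (PySem.List.mem_dedup l e).mp he
        by_cases hex : e = x
        · subst hex
          rw [fstIdx_append [e] he', sndIdx?_append_of_some he' hs, hs]
        · rw [fstIdx_append [x] he', sndIdx?_append_of_ne he' hex]
    · -- fresh state: appended with no second occurrence
      have hcont' : occ.contains x = false := by rw [hcont]; simpa
      have : occStep occ ((l.length : Int), x)
          = occ.insert x ((l.length : Int), none) := by
        simp [occStep, hcont']
      rw [this, PySem.Dict.items_insert_of_not_contains occ _ hcont', ih]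
      unfold occSpec
      rw [dedup_append_singleton]
      simp only [hx, if_false, List.map_append, List.map_cons, List.map_nil]
      congr 1
      · apply List.map_congr_left
        intro e he
        have he' : e ∈ l := (PySem.List.mem_dedup l e).mp he
        have hex : e ≠ x := fun h => hx (h ▸ he')
        rw [fstIdx_append [x] he', sndIdx?_append_of_ne he' hex]
      · rw [fstIdx_append_self hx, sndIdx?_append_fresh hx]

lemma dedup_pairwise_fstIdx (l : List (Int × Int)) :
    (PySem.List.dedup l).Pairwise (fun a b => fstIdx l a < fstIdx l b) := by
  induction l using List.reverseRecOn with
  | nil => simp [PySem.List.dedup, PySem.Set.ofList, PySem.Set.empty]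
  | append_singleton l x ih =>
    rw [dedup_append_singleton]
    split_ifs with hx
    · exact ih.imp_of_mem (fun ha hb hab => by
        rw [fstIdx_append [x] ((PySem.List.mem_dedup l _).mp ha),
            fstIdx_append [x] ((PySem.List.mem_dedup l _).mp hb)]
        exact hab)
    · rw [List.pairwise_append]
      refine ⟨ih.imp_of_mem (fun ha hb hab => by
        rw [fstIdx_append [x] ((PySem.List.mem_dedup l _).mp ha),
            fstIdx_append [x] ((PySem.List.mem_dedup l _).mp hb)]
        exact hab), by simp, ?_⟩
      intro a ha b hb
      have hb' : b = x := by simpa using hb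
      rw [hb']
      have ha' : a ∈ l := (PySem.List.mem_dedup l a).mp ha
      rw [fstIdx_append [x] ha', fstIdx_append_self hx]
      exact fstIdx_lt ha'

-- ---- findDup characterisation ----
lemma findDup_eq_none_iff (s : List (Int × Int)) (i : Nat) :
    findDup s i = none ↔ s.Nodup := by
  induction s generalizing i with
  | nil => simp [findDup]
  | cons e rest ih =>
    simp only [findDup, List.nodup_cons]
    have hmemiff : e ∈ rest ↔ (PySem.List.index? rest e).isSome :=
      (PySem.List.index?_isSome_iff rest e).symm
    cases hk : PySem.List.index? rest e with
    | some k =>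
      rw [hk] at hmemiff
      simp only [reduceCtorEq, false_iff]
      intro ⟨hmem, _⟩
      exact hmem (hmemiff.mpr rfl)
    | none =>
      rw [hk] at hmemiff
      rw [ih]
      simp at hmemiff
      simp [hmemiff]

lemma findDup_shift (s : List (Int × Int)) (i : Nat) :
    findDup s i = (findDup s 0).map (fun p => (p.1 + i, p.2 + i)) := by
  induction s generalizing i with
  | nil => simp [findDup]
  | cons e rest ih =>
    simp only [findDup]
    cases hk : PySem.List.index? rest e with
    | some k => simp [Nat.add_comm, Nat.add_left_comm]
    | none =>
      rw [ih (i + 1), ih 1]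
      cases findDup rest 0 with
      | none => simp
      | some p => simp; omega

lemma findDup_some_spec (l : List (Int × Int)) (i j : Nat)
    (h : findDup l 0 = some (i, j)) :
    ∃ e k, PySem.List.index? l e = some i ∧
      PySem.List.index? (l.drop (i + 1)) e = some k ∧ j = i + 1 + k ∧
      ∀ n (hn : n < l.length), n < i → l[n] ∉ l.drop (n + 1) := by
  induction l generalizing i j with
  | nil => simp [findDup] at h
  | cons e rest ih =>
    simp only [findDup] at h
    cases hk : PySem.List.index? rest e with
    | some k =>
      rw [hk] at h
      simp only [Option.some.injEq, Prod.mk.injEq] at h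
      obtain ⟨hi, hj⟩ := h
      refine ⟨e, k, ?_, ?_, ?_, ?_⟩
      · rw [← hi]; exact PySem.List.index?_cons_self e rest
      · rw [← hi]; simpa using hk
      · omega
      · intro n hn hlt; omega
    | none =>
      rw [hk] at h
      have hnot : e ∉ rest := by
        have := (PySem.List.index?_isSome_iff rest e)
        rw [hk] at this
        simp at this
        exact this
      rw [findDup_shift rest 1] at h
      cases h0 : findDup rest 0 with
      | none => rw [h0] at h; simp at h
      | some p =>
        obtain ⟨i0, j0⟩ := p
        rw [h0] at h
        simp only [Option.map_some, Option.some.injEq, Prod.mk.injEq] at h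
        obtain ⟨hi, hj⟩ := h
        obtain ⟨e2, k, hfst, hsnd, hjk, hpre⟩ := ih i0 j0 h0
        have hne : e ≠ e2 := by
          rintro rfl
          have hiff := PySem.List.index?_isSome_iff rest e
          rw [hfst] at hiff
          exact hnot (hiff.mp rfl)
        refine ⟨e2, k, ?_, ?_, ?_, ?_⟩
        · rw [PySem.List.index?_cons_of_ne rest hne, hfst, ← hi]; rfl
        · rw [← hi]
          simpa [List.drop_succ_cons] using hsnd
        · omega
        · intro n hn hlt
          match n, hn with
          | 0, _ => simpa using hnot
          | (m+1), hn =>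
            have : m < i0 := by omega
            simpa [List.drop_succ_cons] using hpre m (by simpa using hn) this

-- ---- B-side: the whole function ----
def gOcc (l : List (Int × Int)) (e : Int × Int) : Option (Int × Int) :=
  (sndIdx? l e).map (fun j => ((fstIdx l e : Int), j))

-- min2?'s fold function at key functions fst/snd (definitionally equal to min2?'s body)
def minF (acc : Option (Int × Int)) (x : Int × Int) : Option (Int × Int) :=
  match acc with
  | none => some x
  | some m =>
    if (decide (x.1 < m.1) || !decide (m.1 < x.1) && decide (x.2 < m.2)) = true
    then some x else some m

lemma foldl_minF_of_lt (p : Int × Int) :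
    ∀ (T : List (Int × Int)), (∀ q ∈ T, p.1 < q.1) →
      T.foldl minF (some p) = some p := by
  intro T
  induction T with
  | nil => intro _; rfl
  | cons q T' ih =>
    intro hq
    have h1 : p.1 < q.1 := hq q List.mem_cons_self
    have hc : minF (some p) q = some p := by
      have h2 : ¬ q.1 < p.1 := by omega
      simp [minF, h1, h2]
    rw [List.foldl_cons, hc]
    exact ih (fun r hr => hq r (List.mem_cons_of_mem q hr))

lemma min2?_eq_foldl_minF (T : List (Int × Int)) :
    PySem.List.min2? T Prod.fst Prod.snd = T.foldl minF none := by
  unfold PySem.List.min2?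
  congr 1
  funext acc x
  cases acc <;> rfl

lemma min2?_cons_of_lt (p : Int × Int) (T : List (Int × Int))
    (h : ∀ q ∈ T, p.1 < q.1) :
    PySem.List.min2? (p :: T) Prod.fst Prod.snd = some p := by
  rw [min2?_eq_foldl_minF, List.foldl_cons]
  exact foldl_minF_of_lt p T h

lemma optB_eq_findDup (l : List (Int × Int)) :
    optimizar_ruta_alt l = splice l (findDup l 0) := by
  have hpairs : (((PySem.List.enumerate l 0).foldl occStep PySem.Dict.empty).values).filterMap
        (fun p => p.2.map (fun j => (p.1, j)))
      = (PySem.List.dedup l).filterMap (gOcc l) := by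
    have hvals : ((PySem.List.enumerate l 0).foldl occStep PySem.Dict.empty).values
        = (occSpec l).map (fun p => p.2) := by
      simp [PySem.Dict.values, occ_items l]
    rw [hvals]
    unfold occSpec
    rw [List.map_map, List.filterMap_map]
    apply List.filterMap_congr
    intro e _
    simp [gOcc, Function.comp_def]
  unfold optimizar_ruta_alt
  simp only [hpairs]
  cases hfd : findDup l 0 with
  | none =>
    have hnd : l.Nodup := (findDup_eq_none_iff l 0).mp hfd
    have hG : ∀ e ∈ PySem.List.dedup l, gOcc l e = none := by
      intro e he
      have he' : e ∈ l := (PySem.List.mem_dedup l e).mp he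
      obtain ⟨pre, suf, hdec, hlen, hnp⟩ :=
        (PySem.List.index?_eq_some_iff l e (fstIdx l e)).mp (fstIdx_some he')
      have hdropsuf : l.drop (fstIdx l e + 1) = suf := by
        rw [← hlen, hdec, List.drop_append]
        have h1 : List.drop (pre.length + 1) pre = [] := List.drop_eq_nil_of_le (by omega)
        simp [h1]
      have hnotin : e ∉ suf := by
        rw [hdec, List.nodup_middle, List.nodup_cons] at hnd
        exact fun hm => hnd.1 (List.mem_append_right pre hm)
      have hnone : PySem.List.index? (l.drop (fstIdx l e + 1)) e = none := by
        rw [hdropsuf]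
        cases hq : PySem.List.index? suf e with
        | none => rfl
        | some k => exact absurd (mem_of_index?_some hq) hnotin
      unfold gOcc sndIdx?
      rw [hnone]
      rfl
    rw [List.filterMap_eq_nil_iff.mpr hG]
    simp [PySem.List.min2?, splice]
  | some p =>
    obtain ⟨i, j⟩ := p
    obtain ⟨e, k, hfst, hsnd, hjk, hpre⟩ := findDup_some_spec l i j hfd
    have he : e ∈ l := mem_of_index?_some hfst
    have hfstIdx : fstIdx l e = i := by unfold fstIdx; rw [hfst]; rfl
    have hGe : gOcc l e = some ((i : Int), (i : Int) + 1 + (k : Int)) := by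
      unfold gOcc sndIdx?
      rw [hfstIdx, hsnd]
      rfl
    obtain ⟨P, S, hPS⟩ := List.append_of_mem ((PySem.List.mem_dedup l e).mpr he)
    have hpw := dedup_pairwise_fstIdx l
    rw [hPS, List.pairwise_append] at hpw
    obtain ⟨hPp, hES, hcross⟩ := hpw
    have hSgt : ∀ b ∈ S, i < fstIdx l b := by
      intro b hb
      have := (List.pairwise_cons.mp hES).1 b hb
      rw [hfstIdx] at this
      exact this
    have hPnone : ∀ a ∈ P, gOcc l a = none := by
      intro a ha
      have ha' : a ∈ l := by
        have : a ∈ PySem.List.dedup l := by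
          rw [hPS]; exact List.mem_append_left _ ha
        exact (PySem.List.mem_dedup l a).mp this
      have halt : fstIdx l a < i := by
        have := hcross a ha e List.mem_cons_self
        rw [hfstIdx] at this
        exact this
      obtain ⟨hia, hva, _⟩ := PySem.List.getElem_of_index?_eq_some (fstIdx_some ha')
      have hnotin : a ∉ l.drop (fstIdx l a + 1) := by
        have := hpre (fstIdx l a) hia halt
        rw [hva] at this
        exact this
      have hnone : PySem.List.index? (l.drop (fstIdx l a + 1)) a = none := by
        cases hq : PySem.List.index? (l.drop (fstIdx l a + 1)) a with
        | none => rfl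
        | some k => exact absurd (mem_of_index?_some hq) hnotin
      unfold gOcc sndIdx?
      rw [hnone]
      rfl
    have hfm : (PySem.List.dedup l).filterMap (gOcc l)
        = ((i : Int), (i : Int) + 1 + (k : Int)) :: S.filterMap (gOcc l) := by
      rw [hPS, List.filterMap_append, List.filterMap_eq_nil_iff.mpr hPnone,
        List.nil_append, List.filterMap_cons, hGe]
    have htail : ∀ q ∈ S.filterMap (gOcc l), ((i : Int), (i : Int) + 1 + (k : Int)).1 < q.1 := by
      intro q hq
      obtain ⟨s, hsS, hGs⟩ := List.mem_filterMap.mp hq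
      have his : i < fstIdx l s := hSgt s hsS
      unfold gOcc at hGs
      cases hsi : sndIdx? l s with
      | none => rw [hsi] at hGs; simp at hGs
      | some j' =>
        rw [hsi] at hGs
        simp only [Option.map_some, Option.some.injEq] at hGs
        rw [← hGs]
        have hc : (i : Int) < (fstIdx l s : Int) := by exact_mod_cast his
        simpa using hc
    rw [hfm, min2?_cons_of_lt _ _ htail]
    show PySem.List.slice l none (some (i : Int))
        ++ PySem.List.slice l (some ((i : Int) + 1 + (k : Int))) none = splice l (some (i, j))
    have hcast : ((i : Int) + 1 + (k : Int)) = ((i + 1 + k : Nat) : Int) := by push_cast; ring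
    rw [PySem.List.slice_to_natCast, hcast, PySem.List.slice_from_natCast]
    simp [splice, hjk]

-- ===== VERDICT (by name: the statement is the Claim_ definition above) =====
theorem optimizar_ruta_spec : Claim_equal_optimizar_ruta := by
  intro lista _
  unfold Spec_optimizar_ruta optimizar_ruta
  rw [optB_eq_findDup, optARun_eq_findDup lista lista 0 List.drop_zero (by simp)]
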